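-- pv_equiv track=rewrite | github.com/WhisperRen/SBG | functions.py | alter_name
-- ===== SOURCE A (Python) =====
-- def alter_name(func,num,ext):
--     b = 'amp'
--     c = 'f'
--     if num == -1:
--         if ext == 'B':
--             item = '_B'
--         else:
--             item = '_J'
--     else:
--         if ext == 'B':
--             item = '_B'+str(num)
--         else:
--             item = '_J'+str(num)
--
--     index1 = -3
--     while index1 != -1:
--         index1 = func.find(b,index1+3)
--         func = list(func)
--         if index1 != -1:
--             func.insert(index1+3,item)
--         else:
--             pass
--         func = ''.join(func)
--
--     index2 = -2
--     while index2 != -1: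
--         index2 = func.find(c,index2+2)
--         func = list(func)
--         if index2 != -1:
--             func.insert(index2+1,item)
--         else:
--             pass
--         func = ''.join(func)
--     return func
-- ===== SOURCE B (Python) =====
-- def alter_name(func, num, ext):
--     suffix = '_B' if ext == 'B' else '_J'
--     item = suffix if num == -1 else suffix + str(num)
--     out = []
--     i = 0
--     n = len(func)
--     while i < n:
--         if func[i] == 'f':
--             out.append('f' + item)
--             i += 1
--         elif func[i:i+3] == 'amp':
--             out.append('amp' + item)
--             i += 3
--         else:
--             out.append(func[i])
--             i += 1
--     return ''.join(out)
-- ===== Notes on version B (the rewrite author's own statement) =====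
-- stated objective: faster
-- what changed: A's two while-loops, each repeatedly calling find and rebuilding the whole string with list/insert/join per match, are replaced by one left-to-right scan that appends 'f'+item, 'amp'+item or the plain character to an output list and joins once.
import Mathlib
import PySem

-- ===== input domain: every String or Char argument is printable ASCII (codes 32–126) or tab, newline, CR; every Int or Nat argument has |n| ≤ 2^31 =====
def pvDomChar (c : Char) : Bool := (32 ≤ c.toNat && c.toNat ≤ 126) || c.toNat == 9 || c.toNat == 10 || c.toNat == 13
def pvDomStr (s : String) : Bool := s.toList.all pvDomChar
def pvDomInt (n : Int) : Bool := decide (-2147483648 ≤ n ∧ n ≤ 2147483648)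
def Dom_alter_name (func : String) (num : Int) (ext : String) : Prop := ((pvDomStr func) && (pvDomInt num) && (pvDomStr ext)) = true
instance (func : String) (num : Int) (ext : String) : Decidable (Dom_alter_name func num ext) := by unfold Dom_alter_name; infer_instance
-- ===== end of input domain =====

-- B replaces A's two repeated find-and-reinsert passes with one left-to-right scan that emits the tag right after each 'f' and each 'amp'; measured faster at the large sizes.

-- ===== PORT A =====
-- A's while-loops mutate `func` and a search index; ported as recursion over the same state
-- (string, last found index) with a fuel of length+1, which provably suffices: each iteration
-- that finds a match consumes one occurrence, and the inserted tag creates none (the proofs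
-- below establish exactly this).  Python does list(func); func.insert(j+k, item); ''.join(func):
-- inserting the string `item` as ONE list element and joining splices its characters at index
-- j+k, which is ≤ len (the match ends there), so it is exactly take ++ item ++ drop.
def ampLoopA (item : List Char) : Nat → List Char → Int → List Char
  | 0, s, _ => s
  | fuel+1, s, index1 =>
    let j := PySem.Chars.findFrom s ['a', 'm', 'p'] (index1 + 3)
    if j = -1 then s
    else ampLoopA item fuel (s.take (j + 3).toNat ++ item ++ s.drop (j + 3).toNat) j

def fLoopA (item : List Char) : Nat → List Char → Int → List Char
  | 0, s, _ => s
  | fuel+1, s, index2 =>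
    let j := PySem.Chars.findFrom s ['f'] (index2 + 2)
    if j = -1 then s
    else fLoopA item fuel (s.take (j + 1).toNat ++ item ++ s.drop (j + 1).toNat) j

def alter_name (func : String) (num : Int) (ext : String) : String :=
  let item := if num = -1 then (if ext = "B" then "_B" else "_J")
              else (if ext = "B" then "_B" ++ PySem.Int.toStr num else "_J" ++ PySem.Int.toStr num)
  let s0 := func.toList
  let s1 := ampLoopA item.toList (s0.length + 1) s0 (-3)
  let s2 := fLoopA item.toList (s1.length + 1) s1 (-2)
  String.mk s2

-- ===== PORT B =====
-- Source B's single scan: at 'f' emit 'f'+item and step 1; at 'amp' (func[i:i+3]=='amp') emit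
-- 'amp'+item and step 3; otherwise copy the character.
def scanB (item : List Char) : List Char → List Char
  | [] => []
  | c :: rest =>
    if c = 'f' then 'f' :: (item ++ scanB item rest)
    else if c :: rest.take 2 = ['a', 'm', 'p'] then
      'a' :: 'm' :: 'p' :: (item ++ scanB item (rest.drop 2))
    else c :: scanB item rest
  termination_by s => s.length
  decreasing_by all_goals (simp; try omega)

def alter_name_alt (func : String) (num : Int) (ext : String) : String :=
  let suffix := if ext = "B" then "_B" else "_J"
  let item := if num = -1 then suffix else suffix ++ PySem.Int.toStr num
  String.mk (scanB item.toList func.toList)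

-- ===== PRECONDITION & SPEC =====
def Spec_alter_name (func : String) (num : Int) (ext : String) (out : String) : Prop := out = alter_name_alt func num ext
instance (func : String) (num : Int) (ext : String) (out : String) : Decidable (Spec_alter_name func num ext out) := by unfold Spec_alter_name; infer_instance

-- ===== CLAIM (what is proved, stated in full; the proofs are below) =====
def Claim_equal_alter_name : Prop := ∀ (func : String) (num : Int) (ext : String), Dom_alter_name func num ext → Spec_alter_name func num ext (alter_name func num ext)

-- ===== LEMMAS AND PROOFS =====

-- insAmp/insF: structural "insert item after every occurrence" references linking the two ports.
def insAmp (item : List Char) : List Char → List Char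
  | [] => []
  | c :: rest =>
    if c :: rest.take 2 = ['a', 'm', 'p'] then
      'a' :: 'm' :: 'p' :: (item ++ insAmp item (rest.drop 2))
    else c :: insAmp item rest
  termination_by s => s.length
  decreasing_by all_goals (simp; try omega)

def insF (item : List Char) : List Char → List Char
  | [] => []
  | c :: rest => if c = 'f' then 'f' :: (item ++ insF item rest) else c :: insF item rest

theorem amp_prefix_iff (c : Char) (rest : List Char) :
    ['a', 'm', 'p'] <+: c :: rest ↔ c :: rest.take 2 = ['a', 'm', 'p'] := by
  rw [List.prefix_iff_eq_take]
  constructor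
  · intro h; simpa using h.symm
  · intro h; simpa using h.symm

theorem f_prefix_iff (c : Char) (rest : List Char) :
    ['f'] <+: c :: rest ↔ c = 'f' := by
  rw [List.prefix_iff_eq_take]; simp [eq_comm]

theorem find_eq_of_first (s sub : List Char) (i : Nat)
    (hocc : sub <+: s.drop i) (hmin : ∀ l < i, ¬ sub <+: s.drop l) :
    PySem.Chars.find s sub = (i : Int) := by
  have hin : PySem.Chars.isIn sub s = true := by
    rw [← PySem.Chars.exists_prefix_drop_iff_isIn]; exact ⟨i, hocc⟩
  have hne : PySem.Chars.find s sub ≠ -1 := by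
    intro h; rw [PySem.Chars.find_eq_neg_one_iff] at h
    exact h ((PySem.Chars.isIn_iff_infix sub s).mp hin)
  have h0 : 0 ≤ PySem.Chars.find s sub := by
    have := PySem.Chars.neg_one_le_find s sub; omega
  obtain ⟨hocc', hmin'⟩ := PySem.Chars.find_spec h0
  have h1 : ¬ i < (PySem.Chars.find s sub).toNat := fun h => hmin' i h hocc
  have h2 : ¬ (PySem.Chars.find s sub).toNat < i := fun h => hmin _ h hocc'
  omega

theorem no_occ_head (a : Char) (sub' u v : List Char) (hu : ∀ c ∈ u, c ≠ a) :
    ∀ p < u.length, ¬ (a :: sub') <+: (u ++ v).drop p := by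
  intro p hp hpre
  rw [List.drop_append_of_le_length (le_of_lt hp), List.drop_eq_getElem_cons hp,
    List.cons_append, List.cons_prefix_cons] at hpre
  exact hu u[p] (List.getElem_mem hp) hpre.1.symm

theorem find_append_clean (a : Char) (sub' u v : List Char) (hu : ∀ c ∈ u, c ≠ a) :
    PySem.Chars.find (u ++ v) (a :: sub') =
      if PySem.Chars.find v (a :: sub') = -1 then -1
      else (u.length : Int) + PySem.Chars.find v (a :: sub') := by
  by_cases h : PySem.Chars.find v (a :: sub') = -1
  · rw [if_pos h]
    rw [PySem.Chars.find_eq_neg_one_iff] at h ⊢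
    intro hinf
    obtain ⟨j, hj⟩ := (PySem.Chars.exists_prefix_drop_iff_isIn (a :: sub') (u ++ v)).mpr
      ((PySem.Chars.isIn_iff_infix _ _).mpr hinf)
    by_cases hjl : j < u.length
    · exact no_occ_head a sub' u v hu j hjl hj
    · apply h
      rw [← PySem.Chars.isIn_iff_infix, ← PySem.Chars.exists_prefix_drop_iff_isIn]
      refine ⟨j - u.length, ?_⟩
      rw [List.drop_append, List.drop_of_length_le (by omega)] at hj
      simpa using hj
  · rw [if_neg h]
    have h0 : 0 ≤ PySem.Chars.find v (a :: sub') := by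
      have := PySem.Chars.neg_one_le_find v (a :: sub'); omega
    obtain ⟨hocc, hmin⟩ := PySem.Chars.find_spec h0
    have := find_eq_of_first (u ++ v) (a :: sub') (u.length + (PySem.Chars.find v (a :: sub')).toNat)
      (by rw [List.drop_append]; simpa [List.drop_of_length_le] using hocc)
      (by
        intro l hl hpre
        by_cases hll : l < u.length
        · exact no_occ_head a sub' u v hu l hll hpre
        · rw [List.drop_append, List.drop_of_length_le (by omega)] at hpre
          exact hmin (l - u.length) (by omega) (by simpa using hpre))
    rw [this]; push_cast; omega

theorem insAmp_of_no_occ (item s : List Char) (h : ¬ ['a', 'm', 'p'] <:+: s) :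
    insAmp item s = s := by
  fun_induction insAmp item s with
  | case1 => rfl
  | case2 c rest hc ih =>
    exact absurd (((amp_prefix_iff c rest).mpr hc).isInfix) h
  | case3 c rest hc ih =>
    rw [ih (fun hinf => h (List.infix_cons hinf))]

theorem insAmp_split_first (item : List Char) (i : Nat) (s : List Char)
    (hocc : ['a', 'm', 'p'] <+: s.drop i) (hmin : ∀ l < i, ¬ ['a', 'm', 'p'] <+: s.drop l) :
    insAmp item s = s.take (i + 3) ++ item ++ insAmp item (s.drop (i + 3)) := by
  induction i generalizing s with
  | zero =>
    rw [List.drop_zero] at hocc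
    obtain ⟨t, ht⟩ := hocc
    subst ht
    rw [show (['a', 'm', 'p'] ++ t) = 'a' :: 'm' :: 'p' :: t from rfl, insAmp]
    simp
  | succ i ih =>
    match s with
    | [] => simp at hocc
    | c :: rest =>
      have hne : ¬ ['a', 'm', 'p'] <+: c :: rest := hmin 0 (by omega)
      rw [insAmp, if_neg (fun hc => hne ((amp_prefix_iff c rest).mpr hc))]
      rw [ih rest hocc (fun l hl => hmin (l + 1) (by omega))]
      simp [List.take_succ_cons, List.drop_succ_cons, show i + 1 + 3 = (i + 3) + 1 by omega]

theorem insF_of_no_occ (item s : List Char) (h : ¬ ['f'] <:+: s) :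
    insF item s = s := by
  induction s with
  | nil => rfl
  | cons c rest ih =>
    rw [insF, if_neg (fun hc => h (((f_prefix_iff c rest).mpr hc).isInfix)),
      ih (fun hinf => h (List.infix_cons hinf))]

theorem insF_append_clean (item u v : List Char) (hu : ∀ c ∈ u, c ≠ 'f') :
    insF item (u ++ v) = u ++ insF item v := by
  induction u with
  | nil => simp
  | cons c u' ih =>
    rw [List.cons_append, insF, if_neg (hu c List.mem_cons_self),
      ih (fun d hd => hu d (List.mem_cons_of_mem c hd))]
    rfl

theorem insF_split_first (item : List Char) (i : Nat) (s : List Char)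
    (hocc : ['f'] <+: s.drop i) (hmin : ∀ l < i, ¬ ['f'] <+: s.drop l) :
    insF item s = s.take (i + 1) ++ item ++ insF item (s.drop (i + 1)) := by
  induction i generalizing s with
  | zero =>
    rw [List.drop_zero] at hocc
    obtain ⟨t, ht⟩ := hocc
    subst ht
    rw [show (['f'] ++ t) = 'f' :: t from rfl, insF]
    simp
  | succ i ih =>
    match s with
    | [] => simp at hocc
    | c :: rest =>
      have hne : ¬ ['f'] <+: c :: rest := hmin 0 (by omega)
      rw [insF, if_neg (fun hc => hne ((f_prefix_iff c rest).mpr hc)),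
        ih rest hocc (fun l hl => hmin (l + 1) (by omega))]
      simp

theorem ampLoopA_eq (item : List Char) (hitem : ∀ c ∈ item, c ≠ 'a') :
    ∀ (fuel : Nat) (pre u rest : List Char), (∀ c ∈ u, c ≠ 'a') → rest.length < fuel →
      ampLoopA item fuel (pre ++ (u ++ rest)) ((pre.length : Int) - 3) =
        pre ++ u ++ insAmp item rest := by
  intro fuel
  induction fuel with
  | zero => intro pre u rest hu hlen; omega
  | succ f ih =>
    intro pre u rest hu hlen
    rw [ampLoopA]
    simp only [show (pre.length : Int) - 3 + 3 = (pre.length : Int) by omega]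
    rw [PySem.Chars.findFrom_natCast _ _ pre.length (by simp), List.drop_left,
      find_append_clean 'a' ['m', 'p'] u rest hu]
    by_cases hv : PySem.Chars.find rest ['a', 'm', 'p'] = -1
    · rw [if_pos hv, if_pos rfl, if_pos rfl,
        insAmp_of_no_occ item rest ((PySem.Chars.find_eq_neg_one_iff rest _).mp hv)]
      simp
    · have h0 : 0 ≤ PySem.Chars.find rest ['a', 'm', 'p'] := by
        have := PySem.Chars.neg_one_le_find rest ['a', 'm', 'p']; omega
      set fv := PySem.Chars.find rest ['a', 'm', 'p'] with hfv
      obtain ⟨hocc, hmin⟩ := PySem.Chars.find_spec h0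
      have hb : fv.toNat + 3 ≤ rest.length := by
        have := hocc.length_le
        simp [List.length_drop] at this
        omega
      rw [if_neg hv, if_neg (by omega), if_neg (by omega)]
      have hK : ((pre.length : Int) + ((u.length : Int) + fv) + 3).toNat
          = pre.length + u.length + (fv.toNat + 3) := by omega
      have htake : (pre ++ (u ++ rest)).take (pre.length + u.length + (fv.toNat + 3))
          = pre ++ (u ++ rest.take (fv.toNat + 3)) := by
        rw [List.take_append, List.take_of_length_le (by omega), List.take_append,
          List.take_of_length_le (by omega)]
        rw [show pre.length + u.length + (fv.toNat + 3) - pre.length - u.length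
          = fv.toNat + 3 by omega]
      have hdrop : (pre ++ (u ++ rest)).drop (pre.length + u.length + (fv.toNat + 3))
          = rest.drop (fv.toNat + 3) := by
        rw [List.drop_append, List.drop_of_length_le (by omega), List.drop_append,
          List.drop_of_length_le (by omega)]
        simp only [List.nil_append]
        rw [show pre.length + u.length + (fv.toNat + 3) - pre.length - u.length
          = fv.toNat + 3 by omega]
      rw [hK, htake, hdrop]
      have harg : pre ++ (u ++ rest.take (fv.toNat + 3)) ++ item ++ rest.drop (fv.toNat + 3)
          = (pre ++ (u ++ rest.take (fv.toNat + 3))) ++ (item ++ rest.drop (fv.toNat + 3)) := by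
        simp
      have hidx : (pre.length : Int) + ((u.length : Int) + fv)
          = ((pre ++ (u ++ rest.take (fv.toNat + 3))).length : Int) - 3 := by
        simp [List.length_take]
        omega
      rw [harg, hidx, ih (pre ++ (u ++ rest.take (fv.toNat + 3))) item
        (rest.drop (fv.toNat + 3)) hitem (by rw [List.length_drop]; omega)]
      rw [insAmp_split_first item fv.toNat rest hocc hmin]
      simp

theorem fLoopA_eq (item : List Char) (hitem : ∀ c ∈ item, c ≠ 'f') (hne : item ≠ []) :
    ∀ (fuel : Nat) (pre u rest : List Char), (∀ c ∈ u, c ≠ 'f') → rest.length < fuel →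
      fLoopA item fuel (pre ++ (u ++ rest)) ((pre.length : Int) - 2) =
        pre ++ u ++ insF item rest := by
  intro fuel
  induction fuel with
  | zero => intro pre u rest hu hlen; omega
  | succ f ih =>
    intro pre u rest hu hlen
    rw [fLoopA]
    simp only [show (pre.length : Int) - 2 + 2 = (pre.length : Int) by omega]
    rw [PySem.Chars.findFrom_natCast _ _ pre.length (by simp), List.drop_left,
      find_append_clean 'f' [] u rest hu]
    by_cases hv : PySem.Chars.find rest ['f'] = -1
    · rw [if_pos hv, if_pos rfl, if_pos rfl,
        insF_of_no_occ item rest ((PySem.Chars.find_eq_neg_one_iff rest _).mp hv)]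
      simp
    · have h0 : 0 ≤ PySem.Chars.find rest ['f'] := by
        have := PySem.Chars.neg_one_le_find rest ['f']; omega
      set fv := PySem.Chars.find rest ['f'] with hfv
      obtain ⟨hocc, hmin⟩ := PySem.Chars.find_spec h0
      have hb : fv.toNat + 1 ≤ rest.length := by
        have := hocc.length_le
        simp [List.length_drop] at this
        omega
      have hil : 1 ≤ item.length := by
        cases item with
        | nil => exact absurd rfl hne
        | cons c t => simp
      rw [if_neg hv, if_neg (by omega), if_neg (by omega)]
      have hK : ((pre.length : Int) + ((u.length : Int) + fv) + 1).toNat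
          = pre.length + u.length + (fv.toNat + 1) := by omega
      have htake : (pre ++ (u ++ rest)).take (pre.length + u.length + (fv.toNat + 1))
          = pre ++ (u ++ rest.take (fv.toNat + 1)) := by
        rw [List.take_append, List.take_of_length_le (by omega), List.take_append,
          List.take_of_length_le (by omega)]
        rw [show pre.length + u.length + (fv.toNat + 1) - pre.length - u.length
          = fv.toNat + 1 by omega]
      have hdrop : (pre ++ (u ++ rest)).drop (pre.length + u.length + (fv.toNat + 1))
          = rest.drop (fv.toNat + 1) := by
        rw [List.drop_append, List.drop_of_length_le (by omega), List.drop_append,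
          List.drop_of_length_le (by omega)]
        simp only [List.nil_append]
        rw [show pre.length + u.length + (fv.toNat + 1) - pre.length - u.length
          = fv.toNat + 1 by omega]
      rw [hK, htake, hdrop]
      have harg : pre ++ (u ++ rest.take (fv.toNat + 1)) ++ item ++ rest.drop (fv.toNat + 1)
          = (pre ++ (u ++ rest.take (fv.toNat + 1)) ++ item.take 1)
            ++ (item.drop 1 ++ rest.drop (fv.toNat + 1)) := by
        conv_lhs => rw [← List.take_append_drop 1 item]
        simp
      have hidx : (pre.length : Int) + ((u.length : Int) + fv)
          = ((pre ++ (u ++ rest.take (fv.toNat + 1)) ++ item.take 1).length : Int) - 2 := by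
        simp [List.length_take]
        omega
      rw [harg, hidx, ih (pre ++ (u ++ rest.take (fv.toNat + 1)) ++ item.take 1) (item.drop 1)
        (rest.drop (fv.toNat + 1)) (fun c hc => hitem c (List.mem_of_mem_drop hc))
        (by rw [List.length_drop]; omega)]
      rw [insF_split_first item fv.toNat rest hocc hmin]
      conv_rhs => rw [← List.take_append_drop 1 item]
      simp
      rw [← List.drop_one, List.take_append_drop]

theorem insF_insAmp_eq_scanB (item : List Char) (hf : ∀ c ∈ item, c ≠ 'f') (s : List Char) :
    insF item (insAmp item s) = scanB item s := by
  fun_induction scanB item s with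
  | case1 =>
    rw [insAmp, insF]
  | case2 rest ih =>
    rw [insAmp, if_neg (by simp), insF, if_pos rfl, ih]
  | case3 c rest hc hcond ih =>
    rw [insAmp, if_pos hcond, insF, if_neg (by decide), insF, if_neg (by decide),
      insF, if_neg (by decide), insF_append_clean item item _ hf, ih]
  | case4 c rest hc hcond ih =>
    rw [insAmp, if_neg hcond, insF, if_neg hc, ih]

theorem toStr_chars (n : Int) (c : Char) (hc : c ∈ (PySem.Int.toStr n).toList) :
    c ≠ 'a' ∧ c ≠ 'f' := by
  rw [PySem.Int.toList_toStr, PySem.Int.toChars] at hc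
  have hd : ∀ d : Char, d.isDigit = true → d ≠ 'a' ∧ d ≠ 'f' := by
    intro d h
    constructor <;> rintro rfl <;> simp [Char.isDigit] at h
  split at hc
  · rcases List.mem_cons.mp hc with h | h
    · subst h; constructor <;> decide
    · exact hd c (Nat.isDigit_of_mem_toDigits (by norm_num) (by norm_num) h)
  · exact hd c (Nat.isDigit_of_mem_toDigits (by norm_num) (by norm_num) hc)

theorem alter_name_eq (func : String) (num : Int) (ext : String) :
    alter_name func num ext = alter_name_alt func num ext := by
  unfold alter_name alter_name_alt
  dsimp only
  have hitem : (if num = -1 then (if ext = "B" then "_B" else "_J")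
      else (if ext = "B" then "_B" ++ PySem.Int.toStr num else "_J" ++ PySem.Int.toStr num))
      = (if num = -1 then (if ext = "B" then "_B" else "_J")
          else (if ext = "B" then "_B" else "_J") ++ PySem.Int.toStr num) := by
    split_ifs <;> rfl
  rw [hitem]
  set itm := (if num = -1 then (if ext = "B" then "_B" else "_J")
      else (if ext = "B" then "_B" else "_J") ++ PySem.Int.toStr num) with hitm
  have hbase : ("_B" : String).toList = ['_', 'B'] ∧ ("_J" : String).toList = ['_', 'J'] := by
    constructor <;> rfl
  have hcf : ∀ c ∈ itm.toList, c ≠ 'a' ∧ c ≠ 'f' := by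
    intro c hc
    rw [hitm] at hc
    split at hc
    · split at hc
      · rw [show ("_B" : String).toList = ['_', 'B'] from rfl] at hc
        simp only [List.mem_cons, List.not_mem_nil, or_false] at hc
        rcases hc with rfl | rfl <;> constructor <;> decide
      · rw [show ("_J" : String).toList = ['_', 'J'] from rfl] at hc
        simp only [List.mem_cons, List.not_mem_nil, or_false] at hc
        rcases hc with rfl | rfl <;> constructor <;> decide
    · split at hc
      · rw [String.toList_append, show ("_B" : String).toList = ['_', 'B'] from rfl] at hc
        rcases List.mem_append.mp hc with h | h
        · simp only [List.mem_cons, List.not_mem_nil, or_false] at h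
          rcases h with rfl | rfl <;> constructor <;> decide
        · exact toStr_chars num c h
      · rw [String.toList_append, show ("_J" : String).toList = ['_', 'J'] from rfl] at hc
        rcases List.mem_append.mp hc with h | h
        · simp only [List.mem_cons, List.not_mem_nil, or_false] at h
          rcases h with rfl | rfl <;> constructor <;> decide
        · exact toStr_chars num c h
  have hne : itm.toList ≠ [] := by
    rw [hitm]
    split
    · split <;> decide
    · split <;> (rw [String.toList_append]; simp)
  have ha : ∀ c ∈ itm.toList, c ≠ 'a' := fun c hc => (hcf c hc).1
  have hf : ∀ c ∈ itm.toList, c ≠ 'f' := fun c hc => (hcf c hc).2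
  have h1 := ampLoopA_eq itm.toList ha (func.toList.length + 1) [] [] func.toList
    (by simp) (by omega)
  simp only [List.nil_append, List.length_nil, Nat.cast_zero, zero_sub] at h1
  rw [h1]
  have h2 := fLoopA_eq itm.toList hf hne ((insAmp itm.toList func.toList).length + 1) [] []
    (insAmp itm.toList func.toList) (by simp) (by omega)
  simp only [List.nil_append, List.length_nil, Nat.cast_zero, zero_sub] at h2
  rw [h2]
  rw [insF_insAmp_eq_scanB itm.toList hf]

-- ===== VERDICT (by name: the statement is the Claim_ definition above) =====
theorem alter_name_spec : Claim_equal_alter_name := by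
  intro func num ext _
  unfold Spec_alter_name
  exact alter_name_eq func num ext
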